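-- pv_equiv track=rewrite | github.com/yuelfei/NNBA | boundary_assembly_Lite/new_yuefei_tf.py | get_num_class_array
-- ===== SOURCE A (Python) =====
-- def get_num_class_array(label_list):
--     if("array" in str(type(label_list))):
--         label_list=label_list.tolist()
--         label_list=[node[0] for node in label_list]
--     class_type={}
--     for node in label_list:
--         class_name=node[:3]
--         if(class_name not in class_type):
--             class_type[class_name]=1
--         else:class_type[class_name]+=1
--     b = sorted(class_type.items(), key=lambda item: item[0])
--     test = {}
--     for node in b:
--         test[node[0]] = node[1]
--     return test
-- ===== SOURCE B (Python) =====
-- def _runs(prefixes):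
--     """Run-length encode a sorted list: [(value, run length), ...]."""
--     if not prefixes:
--         return []
--     p = prefixes[0]
--     rest = prefixes[1:]
--     i = 0
--     while i < len(rest) and rest[i] == p:
--         i += 1
--     return [(p, 1 + i)] + _runs(rest[i:])
--
--
-- def get_num_class_array(label_list):
--     if ("array" in str(type(label_list))):
--         label_list = label_list.tolist()
--         label_list = [node[0] for node in label_list]
--     prefixes = sorted(node[:3] for node in label_list)
--     return dict(_runs(prefixes))
-- ===== Notes on version B (the rewrite author's own statement) =====
-- stated objective: alternative
-- what changed: Replaces A's count-into-a-dict-then-sort-the-keys strategy with sorting the 3-char prefixes first and run-length encoding the sorted list in one recursive pass, building the result directly in key order.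
import Mathlib
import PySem

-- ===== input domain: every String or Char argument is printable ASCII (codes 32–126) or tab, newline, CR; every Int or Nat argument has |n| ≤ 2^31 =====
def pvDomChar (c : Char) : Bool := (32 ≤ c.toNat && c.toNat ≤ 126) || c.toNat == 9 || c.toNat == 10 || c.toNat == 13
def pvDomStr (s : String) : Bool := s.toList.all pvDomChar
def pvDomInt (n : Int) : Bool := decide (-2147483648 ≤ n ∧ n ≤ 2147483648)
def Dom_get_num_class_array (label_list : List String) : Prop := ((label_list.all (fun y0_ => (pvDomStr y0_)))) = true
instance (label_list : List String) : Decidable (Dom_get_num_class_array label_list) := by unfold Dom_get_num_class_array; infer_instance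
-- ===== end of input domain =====

-- B re-implements A's count-into-dict-then-sort-keys as sort-prefixes-then-run-length-encode (objective: alternative, same result).
-- A's numpy-array guard ("array" in str(type(...))) can never fire for a List String argument, so it has no Lean counterpart.

-- ===== PORT A =====
def get_num_class_array (label_list : List String) : List (String × Int) :=
  -- the "array" guard is dead for a list argument (str(type) = "<class 'list'>")
  let class_type := label_list.foldl (fun d node =>
    let class_name := PySem.Str.slice node none (some 3)
    if d.contains class_name = false then d.insert class_name 1
    -- class_type[class_name] += 1: the key is present here, so d[class_name] = d.getD class_name 0 (no KeyError)
    else d.insert class_name (d.getD class_name 0 + 1)) PySem.Dict.empty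
  let b := PySem.List.sorted class_type.items (fun item => item.1)
  let test := b.foldl (fun t node => t.insert node.1 node.2) PySem.Dict.empty
  test.items

-- ===== PORT B =====
-- the 'while i < len(rest) and rest[i] == p: i += 1' loop of _runs: length of the leading run of p
def pvRunLen (p : String) : List String → Nat
  | [] => 0
  | q :: rest => if q = p then pvRunLen p rest + 1 else 0

-- _runs: run-length encode (rest[i:] is rest.drop i)
def pvRuns : List String → List (String × Int)
  | [] => []
  | p :: rest =>
    (p, 1 + (pvRunLen p rest : Int)) :: pvRuns (rest.drop (pvRunLen p rest))
termination_by l => l.length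
decreasing_by simp [List.length_drop]

def get_num_class_array_alt (label_list : List String) : List (String × Int) :=
  let prefixes := PySem.List.sorted (label_list.map (fun node => PySem.Str.slice node none (some 3))) (fun x => x)
  ((pvRuns prefixes).foldl (fun t node => t.insert node.1 node.2) PySem.Dict.empty).items

-- ===== PRECONDITION & SPEC =====
def Spec_get_num_class_array (label_list : List String) (out : List (String × Int)) : Prop := out = get_num_class_array_alt label_list
instance (label_list : List String) (out : List (String × Int)) : Decidable (Spec_get_num_class_array label_list out) := by unfold Spec_get_num_class_array; infer_instance

-- ===== CLAIM (what is proved, stated in full; the proofs are below) =====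
def Claim_equal_get_num_class_array : Prop := ∀ (label_list : List String), Dom_get_num_class_array label_list → Spec_get_num_class_array label_list (get_num_class_array label_list)

-- ===== LEMMAS AND PROOFS =====

theorem pvRunLen_le (p : String) (l : List String) : pvRunLen p l ≤ l.length := by
  induction l with
  | nil => simp [pvRunLen]
  | cons q rest ih =>
    simp only [pvRunLen]
    split
    · simp only [List.length_cons]; omega
    · simp

theorem mem_take_pvRunLen (p : String) (l : List String) :
    ∀ x ∈ l.take (pvRunLen p l), x = p := by
  induction l with
  | nil => simp
  | cons q rest ih =>
    simp only [pvRunLen]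
    split
    · next hq =>
      intro x hx
      rw [List.take_succ_cons] at hx
      rcases List.mem_cons.mp hx with h | h
      · exact h.trans hq
      · exact ih x h
    · simp

theorem drop_pvRunLen_shape (p : String) (l : List String) :
    l.drop (pvRunLen p l) = [] ∨ ∃ q ds, l.drop (pvRunLen p l) = q :: ds ∧ q ≠ p := by
  induction l with
  | nil => simp
  | cons q rest ih =>
    simp only [pvRunLen]
    split
    · simpa using ih
    · next hq => exact Or.inr ⟨q, rest, rfl, hq⟩

theorem pvRuns_spec (l : List String) (hs : l.Pairwise (· ≤ ·)) :
    (∀ x ∈ pvRuns l, x.1 ∈ l ∧ x.2 = (l.count x.1 : Int)) ∧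
    (∀ k ∈ l, (k, (l.count k : Int)) ∈ pvRuns l) ∧
    (pvRuns l).Pairwise (fun a b => a.1 < b.1) := by
  induction l using pvRuns.induct with
  | case1 => simp [pvRuns]
  | case2 p rest ih =>
    have hall : ∀ x ∈ rest, p ≤ x := (List.pairwise_cons.mp hs).1
    have hrest : rest.Pairwise (· ≤ ·) := (List.pairwise_cons.mp hs).2
    have hd_sorted : (rest.drop (pvRunLen p rest)).Pairwise (· ≤ ·) :=
      hrest.sublist (List.drop_sublist _ rest)
    obtain ⟨IH1, IH2, IH3⟩ := ih hd_sorted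
    have hd_gt : ∀ x ∈ rest.drop (pvRunLen p rest), p < x := by
      rcases drop_pvRunLen_shape p rest with h | ⟨q, ds, h, hq⟩
      · simp [h]
      · intro x hx
        rw [h] at hx
        have hqmem : q ∈ rest := List.mem_of_mem_drop (h ▸ List.mem_cons_self)
        have hpq : p < q := lt_of_le_of_ne (hall q hqmem) (Ne.symm hq)
        have hds : (q :: ds).Pairwise (· ≤ ·) := h ▸ hd_sorted
        rcases List.mem_cons.mp hx with rfl | hx'
        · exact hpq
        · exact lt_of_lt_of_le hpq ((List.pairwise_cons.mp hds).1 x hx')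
    have hnp_d : p ∉ rest.drop (pvRunLen p rest) := fun h => lt_irrefl p (hd_gt p h)
    have htd : rest.take (pvRunLen p rest) ++ rest.drop (pvRunLen p rest) = rest :=
      List.take_append_drop _ rest
    have hlen_t : (rest.take (pvRunLen p rest)).length = pvRunLen p rest := by
      rw [List.length_take]
      exact Nat.min_eq_left (pvRunLen_le p rest)
    have hcp : (p :: rest).count p = 1 + pvRunLen p rest := by
      rw [List.count_cons_self]
      conv_lhs => rw [← htd]
      rw [List.count_append,
        List.count_eq_length.mpr (fun b hb => (mem_take_pvRunLen p rest b hb).symm),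
        List.count_eq_zero.mpr hnp_d, hlen_t]
      omega
    have hck : ∀ k, p < k → (p :: rest).count k = (rest.drop (pvRunLen p rest)).count k := by
      intro k hk
      have hkt : k ∉ rest.take (pvRunLen p rest) := fun h =>
        absurd (mem_take_pvRunLen p rest k h) hk.ne'
      rw [List.count_cons_of_ne hk.ne]
      conv_lhs => rw [← htd]
      rw [List.count_append, List.count_eq_zero.mpr hkt]
      omega
    rw [pvRuns]
    refine ⟨?_, ?_, ?_⟩
    · intro x hx
      rcases List.mem_cons.mp hx with rfl | hx'
      · refine ⟨List.mem_cons_self, ?_⟩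
        rw [hcp]; push_cast; ring
      · obtain ⟨h1, h2⟩ := IH1 x hx'
        exact ⟨List.mem_cons_of_mem p (List.mem_of_mem_drop h1),
          by rw [h2, hck x.1 (hd_gt x.1 h1)]⟩
    · intro k hk
      by_cases hkp : k = p
      · subst hkp
        rw [hcp]; push_cast
        exact List.mem_cons_self
      · have hkrest : k ∈ rest := (List.mem_cons.mp hk).resolve_left hkp
        have hkd : k ∈ rest.drop (pvRunLen p rest) := by
          rcases List.mem_append.mp (htd ▸ hkrest) with h | h
          · exact absurd (mem_take_pvRunLen p rest k h) hkp
          · exact h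
        rw [hck k (hd_gt k hkd)]
        exact List.mem_cons_of_mem _ (IH2 k hkd)
    · exact List.pairwise_cons.mpr ⟨fun y hy => hd_gt y.1 (IH1 y hy).1, IH3⟩

-- rebuilding a dict from pairs with pairwise-distinct keys returns exactly those pairs
theorem items_rebuild (ys : List (String × Int)) (h : (ys.map Prod.fst).Nodup) :
    (ys.foldl (fun t node => t.insert node.1 node.2) PySem.Dict.empty).items = ys := by
  have := PySem.Dict.items_foldl_insert_fresh ys Prod.fst Prod.snd PySem.Dict.empty
    (fun a _ => PySem.Dict.contains_empty a.1) h
  simpa using this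

theorem get_num_class_array_spec0 : ∀ (label_list : List String),
    get_num_class_array label_list = get_num_class_array_alt label_list := by
  intro ll
  have hSPperm := PySem.List.sorted_perm
    (ll.map (fun node => PySem.Str.slice node none (some 3))) (fun x => x) false
  have hSPsorted : (PySem.List.sorted
      (ll.map (fun node => PySem.Str.slice node none (some 3))) (fun x => x)).Pairwise (· ≤ ·) := by
    simpa using PySem.List.sorted_pairwise
      (ll.map (fun node => PySem.Str.slice node none (some 3))) (fun x => x)
  obtain ⟨R1, R2, R3⟩ := pvRuns_spec _ hSPsorted
  -- A's counting loop is the standard counter fold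
  have hstep : (fun (d : PySem.Dict String Int) (node : String) =>
      let class_name := PySem.Str.slice node none (some 3)
      if d.contains class_name = false then d.insert class_name 1
      else d.insert class_name (d.getD class_name 0 + 1))
      = fun d node => d.insert (PySem.Str.slice node none (some 3))
          (d.getD (PySem.Str.slice node none (some 3)) 0 + 1) := by
    funext d node
    by_cases hc : d.contains (PySem.Str.slice node none (some 3)) = false
    · simp [hc, PySem.Dict.getD_of_not_contains d 0 hc]
    · simp [hc]
  have hfold : ll.foldl (fun (d : PySem.Dict String Int) (node : String) =>
      let class_name := PySem.Str.slice node none (some 3)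
      if d.contains class_name = false then d.insert class_name 1
      else d.insert class_name (d.getD class_name 0 + 1)) PySem.Dict.empty
      = PySem.Dict.counter (ll.map (fun node => PySem.Str.slice node none (some 3))) := by
    rw [hstep, ← PySem.Dict.foldl_insert_getD_add_one_eq_counter, List.foldl_map]
  -- keys of the run-length encoding are strictly increasing, hence nodup
  have hkeys : ((pvRuns (PySem.List.sorted
      (ll.map (fun node => PySem.Str.slice node none (some 3))) (fun x => x))).map Prod.fst).Nodup := by
    exact (List.pairwise_map.mpr R3).imp (fun h => ne_of_lt h)
  -- A's sorted counter items ARE the run-length encoding of the sorted prefixes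
  have hsorted_eq : PySem.List.sorted
      (PySem.Dict.counter (ll.map (fun node => PySem.Str.slice node none (some 3)))).items
      (fun item => item.1)
      = pvRuns (PySem.List.sorted
          (ll.map (fun node => PySem.Str.slice node none (some 3))) (fun x => x)) := by
    apply PySem.List.sorted_eq_of_perm_of_pairwise_lt _ _ _ _ R3
    rw [PySem.Dict.items_counter]
    apply List.perm_of_nodup_nodup_toFinset_eq
    · exact R3.imp (fun h he => ne_of_lt h (congrArg Prod.fst he))
    · exact ((PySem.Set.nodup_ofList _).map (fun a b h => congrArg Prod.fst h))
    · ext x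
      simp only [List.mem_toFinset]
      constructor
      · intro hx
        obtain ⟨h1, h2⟩ := R1 x hx
        refine List.mem_map.mpr ⟨x.1, (PySem.Set.mem_ofList _ _).mpr (hSPperm.subset h1), ?_⟩
        rw [← hSPperm.count_eq, ← h2]
      · intro hx
        obtain ⟨a, ha, rfl⟩ := List.mem_map.mp hx
        rw [← hSPperm.count_eq]
        exact R2 a (hSPperm.mem_iff.mpr ((PySem.Set.mem_ofList _ _).mp ha))
  show (List.foldl _ PySem.Dict.empty _).items = (List.foldl _ PySem.Dict.empty _).items
  rw [hfold, hsorted_eq, items_rebuild _ hkeys]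

-- ===== VERDICT (by name: the statement is the Claim_ definition above) =====
theorem get_num_class_array_spec : Claim_equal_get_num_class_array := by
  intro ll _
  unfold Spec_get_num_class_array
  exact get_num_class_array_spec0 ll
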